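-- pv_equiv track=rewrite | github.com/thomsch1/atomic_deep_seek | backend/src/agent/source_classifier.py | _matches_domains
-- ===== SOURCE A (Python) =====
-- from typing import Optional, Dict, Set
--
-- def _matches_domains(domain: str, domain_set: Set[str]) -> bool:
--     """Check if domain matches any pattern in the domain set."""
--     for pattern in domain_set:
--         if pattern.startswith('.'):
--             # TLD or suffix check - handle compound TLDs like .gov.uk
--             if domain.endswith(pattern):
--                 return True
--             # Handle exact match for TLD patterns (e.g., 'gov.uk' matches '.gov.uk')
--             if domain == pattern[1:]:  # Remove leading dot and compare
--                 return True
--         elif '-' in pattern and pattern.endswith('-'):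
--             # Prefix check (like 'uni-', 'univ-')
--             if pattern[:-1] in domain:
--                 return True
--         elif domain == pattern or domain.endswith('.' + pattern):
--             # Exact domain match
--             return True
--     return False
-- ===== SOURCE B (Python) =====
-- def _matches_domains(domain: str, domain_set) -> bool:
--     """Check if domain matches any pattern in the domain set."""
--     # Precompute membership indexes from the domain; each pattern test then
--     # becomes a set lookup instead of a string-matching computation.
--     n = len(domain)
--     suffixes = {domain[i:] for i in range(n + 1)}
--     dot_keys = suffixes | {'.' + domain}
--     exact_keys = {domain} | {domain[i + 1:] for i in range(n) if domain[i] == '.'}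
--     grams = {}  # needle length -> set of n-grams of the domain of that length
--     for p in domain_set:
--         if p.startswith('.'):
--             if p in dot_keys:
--                 return True
--         elif '-' in p and p.endswith('-'):
--             L = len(p) - 1
--             if L not in grams:
--                 grams[L] = {domain[i:i + L] for i in range(n - L + 1)}
--             if p[:-1] in grams[L]:
--                 return True
--         elif p in exact_keys:
--             return True
--     return False
-- ===== Notes on version B (the rewrite author's own statement) =====
-- stated objective: alternative
-- what changed: B precomputes membership indexes from the domain (the set of its suffixes, per-length n-gram sets cached in a dict, and derived dotted/exact key sets) and replaces every per-pattern string-matching computation (endswith/substring/concatenation tests) by a single set lookup per pattern.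
import Mathlib
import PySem

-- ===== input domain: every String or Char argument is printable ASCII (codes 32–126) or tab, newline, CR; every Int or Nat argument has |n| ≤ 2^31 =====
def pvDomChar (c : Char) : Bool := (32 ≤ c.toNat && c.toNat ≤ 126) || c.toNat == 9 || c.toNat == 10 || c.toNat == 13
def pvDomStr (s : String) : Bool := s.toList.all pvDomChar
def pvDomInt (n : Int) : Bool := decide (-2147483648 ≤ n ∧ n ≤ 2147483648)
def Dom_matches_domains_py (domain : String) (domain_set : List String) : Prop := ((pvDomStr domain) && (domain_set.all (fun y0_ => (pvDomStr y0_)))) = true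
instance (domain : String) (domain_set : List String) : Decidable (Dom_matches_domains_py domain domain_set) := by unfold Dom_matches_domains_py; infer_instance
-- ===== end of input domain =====

-- B replaces A's per-pattern string-matching computations by membership lookups in
-- candidate-key sets built from the domain (its suffix set, derived dotted/exact key sets,
-- and per-length n-gram sets cached in a dict): alternative algorithm, same return value.

-- ===== PORT A =====
-- A's for-loop with early return, on code-point lists (strings bridged via toList).
def pyA_loop (d : List Char) : List (List Char) → Bool
  | [] => false
  | p :: rest =>
    if PySem.Chars.startswith p ['.'] then
      if PySem.Chars.endswith d p then true
      else if d == PySem.Chars.slice p (some 1) none then true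
      else pyA_loop d rest
    else if PySem.Chars.isIn ['-'] p && PySem.Chars.endswith p ['-'] then
      if PySem.Chars.isIn (PySem.Chars.slice p none (some (-1))) d then true
      else pyA_loop d rest
    else if d == p || PySem.Chars.endswith d ('.' :: p) then true
    else pyA_loop d rest

def matches_domains_py (domain : String) (domain_set : List String) : Bool :=
  pyA_loop domain.toList (domain_set.map String.toList)

-- ===== PORT B =====
-- Source B's precomputed indexes: {domain[i:]}, {domain[i:j]}, and the derived key sets.
def suffixesOf (d : List Char) : PySem.Set (List Char) :=
  PySem.Set.ofList ((PySem.List.pyRange 0 ((d.length : Int) + 1) 1).map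
    (fun i => PySem.Chars.slice d (some i) none))

-- grams[L] = the set of length-L substrings of the domain, built on first demand.
def gramsAt (d : List Char) (L : Int) : PySem.Set (List Char) :=
  PySem.Set.ofList ((PySem.List.pyRange 0 ((d.length : Int) - L + 1) 1).map
    (fun i => PySem.Chars.slice d (some i) (some (i + L))))

def dotKeysOf (d : List Char) : PySem.Set (List Char) :=
  PySem.Set.union (suffixesOf d) (PySem.Set.ofList [('.' :: d)])

def exactKeysOf (d : List Char) : PySem.Set (List Char) :=
  PySem.Set.union (PySem.Set.ofList [d])
    (PySem.Set.ofList (((PySem.List.pyRange 0 (d.length : Int) 1).filter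
      (fun i => PySem.List.pyGetD d i ' ' == '.')).map
      (fun i => PySem.Chars.slice d (some (i + 1)) none)))

-- Source B's loop: classify the pattern, then one set-membership lookup per pattern,
-- threading the 'grams' cache dict through the iterations.
def pyB_loop (d : List Char) (dot exact : PySem.Set (List Char))
    (grams : PySem.Dict Int (PySem.Set (List Char))) : List (List Char) → Bool
  | [] => false
  | p :: rest =>
    if PySem.Chars.startswith p ['.'] then
      if PySem.Set.contains dot p then true else pyB_loop d dot exact grams rest
    else if PySem.Chars.isIn ['-'] p && PySem.Chars.endswith p ['-'] then
      let L : Int := (p.length : Int) - 1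
      let grams' := if grams.contains L then grams else grams.insert L (gramsAt d L)
      if PySem.Set.contains (grams'.getD L PySem.Set.empty)
          (PySem.Chars.slice p none (some (-1))) then true
      else pyB_loop d dot exact grams' rest
    else if PySem.Set.contains exact p then true
    else pyB_loop d dot exact grams rest

def matches_domains_py_alt (domain : String) (domain_set : List String) : Bool :=
  let d := domain.toList
  pyB_loop d (dotKeysOf d) (exactKeysOf d) PySem.Dict.empty (domain_set.map String.toList)

-- ===== PRECONDITION & SPEC =====
def Spec_matches_domains_py (domain : String) (domain_set : List String) (out : Bool) : Prop := out = matches_domains_py_alt domain domain_set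
instance (domain : String) (domain_set : List String) (out : Bool) : Decidable (Spec_matches_domains_py domain domain_set out) := by unfold Spec_matches_domains_py; infer_instance

-- ===== CLAIM (what is proved, stated in full; the proofs are below) =====
def Claim_equal_matches_domains_py : Prop := ∀ (domain : String) (domain_set : List String), Dom_matches_domains_py domain domain_set → Spec_matches_domains_py domain domain_set (matches_domains_py domain domain_set)

-- ===== LEMMAS AND PROOFS =====

theorem mem_suffixesOf (d p : List Char) :
    p ∈ suffixesOf d ↔ p <:+ d := by
  unfold suffixesOf
  rw [PySem.Set.mem_ofList]
  simp only [List.mem_map, PySem.List.mem_pyRange_one, PySem.Chars.slice_eq_listSlice]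
  constructor
  · rintro ⟨i, ⟨h0, _⟩, hs⟩
    rw [PySem.List.slice_from d h0] at hs
    exact hs ▸ List.drop_suffix _ _
  · intro h
    refine ⟨((d.length - p.length : Nat) : Int), ⟨by positivity, by omega⟩, ?_⟩
    rw [PySem.List.slice_from d (by positivity)]
    simp only [Int.toNat_natCast]
    exact (List.suffix_iff_eq_drop.mp h).symm

theorem contains_gramsAt (d q : List Char) :
    PySem.Set.contains (gramsAt d (q.length : Int)) q = PySem.Chars.isIn q d := by
  rw [Bool.eq_iff_iff, PySem.Set.contains_iff, PySem.Chars.isIn_iff_infix]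
  unfold gramsAt
  rw [PySem.Set.mem_ofList]
  simp only [List.mem_map, PySem.List.mem_pyRange_one, PySem.Chars.slice_eq_listSlice]
  constructor
  · rintro ⟨i, ⟨h0, _⟩, hs⟩
    rw [PySem.List.slice_toNat d h0 (by positivity)] at hs
    exact hs ▸ (List.take_prefix _ _).isInfix.trans (List.drop_suffix _ _).isInfix
  · rintro ⟨t, u, htu⟩
    have hlen : t.length + (q.length + u.length) = d.length := by
      have := congrArg List.length htu; simpa using this
    refine ⟨((t.length : Nat) : Int), ⟨by positivity, by omega⟩, ?_⟩
    rw [PySem.List.slice_toNat d (by positivity) (by positivity)]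
    rw [show ((t.length : Nat) : Int) + (q.length : Int) = ((t.length + q.length : Nat) : Int)
      by push_cast; ring]
    simp only [Int.toNat_natCast]
    rw [Nat.add_sub_cancel_left, ← htu, List.append_assoc, List.drop_left, List.take_left']
    rfl

theorem contains_dotKeysOf (d p : List Char)
    (h : PySem.Chars.startswith p ['.'] = true) :
    PySem.Set.contains (dotKeysOf d) p
      = (PySem.Chars.endswith d p || d == PySem.Chars.slice p (some 1) none) := by
  obtain ⟨t, rfl⟩ : ∃ t, p = '.' :: t := by
    rcases (PySem.Chars.startswith_iff p ['.']).mp h with ⟨t, ht⟩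
    exact ⟨t, ht.symm⟩
  rw [Bool.eq_iff_iff, PySem.Set.contains_iff]
  unfold dotKeysOf
  rw [PySem.Set.mem_union, mem_suffixesOf, PySem.Set.mem_ofList]
  simp only [PySem.Chars.slice_eq_listSlice, PySem.List.slice_from_one, List.tail_cons,
    Bool.or_eq_true, PySem.Chars.endswith_iff, beq_iff_eq, List.mem_singleton, List.cons.injEq,
    true_and]
  exact or_congr Iff.rfl ⟨Eq.symm, Eq.symm⟩

theorem contains_exactKeysOf (d p : List Char) :
    PySem.Set.contains (exactKeysOf d) p
      = (d == p || PySem.Chars.endswith d ('.' :: p)) := by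
  rw [Bool.eq_iff_iff, PySem.Set.contains_iff]
  unfold exactKeysOf
  rw [PySem.Set.mem_union, PySem.Set.mem_ofList, PySem.Set.mem_ofList]
  simp only [List.mem_singleton, List.mem_map, List.mem_filter,
    PySem.List.mem_pyRange_one, Bool.or_eq_true, beq_iff_eq,
    PySem.Chars.endswith_iff, PySem.Chars.slice_eq_listSlice]
  refine or_congr ⟨Eq.symm, Eq.symm⟩ ?_
  constructor
  · rintro ⟨i, ⟨⟨h0, hn⟩, hdot⟩, hs⟩
    rw [PySem.List.slice_from d (by omega)] at hs
    have hkn : i.toNat < d.length := by omega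
    rw [PySem.List.pyGetD_eq_getElem d ' ' h0 hn] at hdot
    refine List.suffix_iff_eq_drop.mpr ?_
    have hdrop := List.drop_eq_getElem_cons hkn
    have : ('.' :: p).length ≤ d.length := by
      have := congrArg List.length hs; simp at this; simp; omega
    rw [show d.length - ('.' :: p).length = i.toNat by
      have := congrArg List.length hs; simp at this; simp; omega]
    rw [hdrop, hdot, show i.toNat + 1 = (i + 1).toNat by omega, hs]
  · rintro ⟨t, htu⟩
    have hlen : t.length + (p.length + 1) = d.length := by
      have := congrArg List.length htu; simpa using this
    have hkn : t.length < d.length := by omega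
    refine ⟨((t.length : Nat) : Int), ⟨⟨by positivity, by exact_mod_cast hkn⟩, ?_⟩, ?_⟩
    · rw [PySem.List.pyGetD_eq_getElem d ' ' (by positivity) (by exact_mod_cast hkn)]
      simp only [Int.toNat_natCast]
      have : d.drop t.length = '.' :: p := by rw [← htu, List.drop_left]
      rw [List.drop_eq_getElem_cons hkn] at this
      exact (List.cons.injEq .. ▸ this).1
    · rw [PySem.List.slice_from d (by positivity)]
      have : d.drop t.length = '.' :: p := by rw [← htu, List.drop_left]
      rw [List.drop_eq_getElem_cons hkn] at this
      have h2 := (List.cons.injEq .. ▸ this).2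
      rw [show ((t.length : Nat) : Int) + 1 = ((t.length + 1 : Nat) : Int) by push_cast; ring,
        Int.toNat_natCast]
      exact h2

theorem loops_eq (d : List Char) (ps : List (List Char))
    (grams : PySem.Dict Int (PySem.Set (List Char)))
    (hinv : ∀ L s, grams.get? L = some s → s = gramsAt d L) :
    pyB_loop d (dotKeysOf d) (exactKeysOf d) grams ps = pyA_loop d ps := by
  induction ps generalizing grams with
  | nil => rfl
  | cons p rest ih =>
    unfold pyB_loop pyA_loop
    by_cases h1 : PySem.Chars.startswith p ['.'] = true
    · rw [if_pos h1, if_pos h1, contains_dotKeysOf d p h1, ih grams hinv]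
      cases PySem.Chars.endswith d p <;>
        cases (d == PySem.Chars.slice p (some 1) none) <;> simp
    · rw [if_neg h1, if_neg h1]
      by_cases h2 : (PySem.Chars.isIn ['-'] p && PySem.Chars.endswith p ['-']) = true
      · rw [if_pos h2, if_pos h2]
        have hp : p ≠ [] := by
          rcases (PySem.Chars.endswith_iff p ['-']).mp (Bool.and_elim_right h2) with ⟨t, ht⟩
          intro h; rw [h] at ht; simp at ht
        have hL : (p.length : Int) - 1 = ((p.dropLast.length : Nat) : Int) := by
          have : p.length ≠ 0 := fun h => hp (List.eq_nil_of_length_eq_zero h)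
          simp [List.length_dropLast]; omega
        have hgD : ((if grams.contains ((p.length : Int) - 1) then grams
            else grams.insert ((p.length : Int) - 1)
              (gramsAt d ((p.length : Int) - 1))).getD ((p.length : Int) - 1) PySem.Set.empty)
            = gramsAt d ((p.length : Int) - 1) := by
          by_cases hc : grams.contains ((p.length : Int) - 1) = true
          · rw [if_pos hc]
            rw [PySem.Dict.contains_eq_isSome_get?] at hc
            obtain ⟨s, hs⟩ := Option.isSome_iff_exists.mp hc
            rw [PySem.Dict.getD_of_get?_eq_some _ _ hs, hinv _ _ hs]
          · rw [if_neg hc,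
              PySem.Dict.getD_of_get?_eq_some _ _ (PySem.Dict.get?_insert_self _ _ _)]
        have hinv' : ∀ L s, ((if grams.contains ((p.length : Int) - 1) then grams
            else grams.insert ((p.length : Int) - 1)
              (gramsAt d ((p.length : Int) - 1))).get? L) = some s → s = gramsAt d L := by
          intro L s hs
          by_cases hc : grams.contains ((p.length : Int) - 1) = true
          · rw [if_pos hc] at hs; exact hinv _ _ hs
          · rw [if_neg hc, PySem.Dict.get?_insert] at hs
            split at hs
            · cases hs; subst ‹L = _›; rfl
            · exact hinv _ _ hs
        simp only []
        rw [hgD, ih _ hinv']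
        congr 1
        rw [show PySem.Chars.slice p none (some (-1)) = p.dropLast from by
          simp [PySem.Chars.slice_eq_listSlice, PySem.List.slice_to_neg_one]]
        rw [hL, contains_gramsAt]
      · rw [if_neg h2, if_neg h2, contains_exactKeysOf, ih grams hinv]

-- ===== VERDICT (by name: the statement is the Claim_ definition above) =====
theorem matches_domains_py_spec : Claim_equal_matches_domains_py := by
  intro domain domain_set _
  unfold Spec_matches_domains_py matches_domains_py matches_domains_py_alt
  rw [loops_eq _ _ _ (fun L s h => by simp [PySem.Dict.get?, PySem.Dict.empty] at h)]
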